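-- pv_equiv track=rewrite | github.com/vinkels/protein | code/protein_generator.py | highscorefreq
-- ===== SOURCE A (Python) =====
-- def highscorefreq(array):
-- 	high = 0
-- 	score = 0
-- 	if array[len(array) -1] != 0:
-- 		return [array[len(array)-1], -len(array)]
-- 	for i in range(len(array)):
-- 		if (array[i] == 0 and array[i-1] != 0):
-- 			high = array[i-1]
-- 			score = -(i-1)
-- 	return [high,score]
-- ===== SOURCE B (Python) =====
-- def highscorefreq(array):
--     if array[-1] != 0:
--         return [array[-1], -len(array)]
--     for i in range(len(array) - 1, 0, -1):
--         if array[i] == 0 and array[i - 1] != 0: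
--             return [array[i - 1], -(i - 1)]
--     return [0, 0]
-- ===== Notes on version B (the rewrite author's own statement) =====
-- stated objective: alternative
-- what changed: Replaces A's full forward sweep that keeps overwriting an accumulator pair with a backward search that returns immediately at the first (i.e. last-in-forward-order) zero preceded by a non-zero.
import Mathlib
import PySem

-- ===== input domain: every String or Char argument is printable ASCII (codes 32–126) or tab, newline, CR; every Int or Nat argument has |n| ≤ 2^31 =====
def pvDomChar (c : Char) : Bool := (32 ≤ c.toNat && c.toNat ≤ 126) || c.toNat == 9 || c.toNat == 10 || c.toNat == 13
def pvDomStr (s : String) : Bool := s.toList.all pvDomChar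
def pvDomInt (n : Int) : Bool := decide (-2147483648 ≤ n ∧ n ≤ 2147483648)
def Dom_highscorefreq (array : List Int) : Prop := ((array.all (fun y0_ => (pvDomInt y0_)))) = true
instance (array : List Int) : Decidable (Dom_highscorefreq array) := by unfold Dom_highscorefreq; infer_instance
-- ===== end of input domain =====

-- B replaces A's accumulator-overwriting forward sweep with a backward search returning at the first match (alternative decomposition, same result).

-- ===== PORT A =====
-- forward loop over range(len(array)), overwriting (high, score) on every match
def highscorefreq (array : List Int) : List Int :=
  if PySem.List.pyGetD array ((array.length : Int) - 1) 0 ≠ 0 then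
    [PySem.List.pyGetD array ((array.length : Int) - 1) 0, -(array.length : Int)]
  else
    let st := (PySem.List.pyRange 0 (array.length : Int) 1).foldl
      (fun (st : Int × Int) i =>
        if PySem.List.pyGetD array i 0 = 0 ∧ PySem.List.pyGetD array (i - 1) 0 ≠ 0 then
          (PySem.List.pyGetD array (i - 1) 0, -(i - 1))
        else st) (0, 0)
    [st.1, st.2]

-- ===== PORT B =====
-- backward loop 'for i in range(len(array)-1, 0, -1)' as structural recursion on the index
def altGo (array : List Int) : Nat → List Int
  | 0 => [0, 0]
  | i + 1 =>
    if PySem.List.pyGetD array ((i : Int) + 1) 0 = 0 ∧ PySem.List.pyGetD array (i : Int) 0 ≠ 0 then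
      [PySem.List.pyGetD array (i : Int) 0, -(i : Int)]
    else altGo array i

def highscorefreq_alt (array : List Int) : List Int :=
  if PySem.List.pyGetD array (-1) 0 ≠ 0 then
    [PySem.List.pyGetD array (-1) 0, -(array.length : Int)]
  else altGo array (array.length - 1)

-- ===== PRECONDITION & SPEC =====
-- Pre_ excludes only the empty list, on which A raises IndexError (array[len(array)-1]).
def Pre_highscorefreq (array : List Int) : Prop := array ≠ []
instance (array : List Int) : Decidable (Pre_highscorefreq array) := by unfold Pre_highscorefreq; infer_instance
def pvWitness_highscorefreq : List Int := [3, 0, 0]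

def Spec_highscorefreq (array : List Int) (out : List Int) : Prop := out = highscorefreq_alt array
instance (array : List Int) (out : List Int) : Decidable (Spec_highscorefreq array out) := by unfold Spec_highscorefreq; infer_instance

-- ===== CLAIM (what is proved, stated in full; the proofs are below) =====
def Claim_equal_highscorefreq : Prop := ∀ (array : List Int), Dom_highscorefreq array → Pre_highscorefreq array → Spec_highscorefreq array (highscorefreq array)

-- ===== LEMMAS AND PROOFS =====

-- proof-only helper: B's descent as a pair, to compare with A's fold state
def pairGo (array : List Int) : Nat → Int × Int
  | 0 => (0, 0)
  | i + 1 =>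
    if PySem.List.pyGetD array ((i : Int) + 1) 0 = 0 ∧ PySem.List.pyGetD array (i : Int) 0 ≠ 0 then
      (PySem.List.pyGetD array (i : Int) 0, -(i : Int))
    else pairGo array i

theorem altGo_eq_pairGo (array : List Int) : ∀ m : Nat,
    altGo array m = [(pairGo array m).1, (pairGo array m).2] := by
  intro m
  induction m with
  | zero => simp [altGo, pairGo]
  | succ k ih =>
    simp only [altGo, pairGo]
    split_ifs with hc
    · rfl
    · exact ih

-- the last forward match is the first backward match: A's fold up to index m equals B's descent from m
theorem fold_eq_pairGo (array : List Int) (h0 : PySem.List.pyGetD array (-1) 0 = 0) :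
    ∀ m : Nat,
      (PySem.List.pyRange 0 ((m : Int) + 1) 1).foldl
          (fun (st : Int × Int) i =>
            if PySem.List.pyGetD array i 0 = 0 ∧ PySem.List.pyGetD array (i - 1) 0 ≠ 0 then
              (PySem.List.pyGetD array (i - 1) 0, -(i - 1))
            else st) (0, 0) = pairGo array m := by
  intro m
  induction m with
  | zero =>
    have h2 : PySem.List.pyRange 0 (((0 : Nat) : Int) + 1) 1 = [0] := by decide
    rw [h2]
    simp [pairGo, h0]
  | succ k ih =>
    have hsr : PySem.List.pyRange 0 ((k : Int) + 1 + 1) 1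
        = PySem.List.pyRange 0 ((k : Int) + 1) 1 ++ [(k : Int) + 1] :=
      PySem.List.pyRange_one_succ_right (by positivity)
    push_cast
    rw [hsr, List.foldl_append]
    simp only [List.foldl_cons, List.foldl_nil]
    by_cases hc : PySem.List.pyGetD array ((k : Int) + 1) 0 = 0 ∧
        PySem.List.pyGetD array ((k : Int) + 1 - 1) 0 ≠ 0
    · have hc' : PySem.List.pyGetD array ((k : Int) + 1) 0 = 0 ∧
          PySem.List.pyGetD array (k : Int) 0 ≠ 0 := by simpa using hc
      rw [if_pos hc]
      simp only [pairGo, if_pos hc']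
      norm_num
    · have hc' : ¬ (PySem.List.pyGetD array ((k : Int) + 1) 0 = 0 ∧
          PySem.List.pyGetD array (k : Int) 0 ≠ 0) := by simpa using hc
      rw [if_neg hc]
      simp only [pairGo, if_neg hc']
      exact ih

-- A's head access array[len-1] is B's array[-1]
theorem last_eq (array : List Int) (h : array ≠ []) :
    PySem.List.pyGetD array ((array.length : Int) - 1) 0 = PySem.List.pyGetD array (-1) 0 := by
  have hlen : 1 ≤ array.length := List.length_pos_iff.mpr h
  rw [PySem.List.pyGetD_neg_one array 0 h,
      PySem.List.pyGetD_eq_getElem array 0 (by omega) (by omega)]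
  rw [List.getLast_eq_getElem]
  congr 1
  omega

-- ===== VERDICT (by name: the statement is the Claim_ definition above) =====
theorem highscorefreq_spec : Claim_equal_highscorefreq := by
  intro array _hdom hpre
  unfold Spec_highscorefreq highscorefreq highscorefreq_alt
  have hlen : 1 ≤ array.length := List.length_pos_iff.mpr hpre
  rw [last_eq array hpre]
  by_cases hl : PySem.List.pyGetD array (-1) 0 ≠ 0
  · simp [hl]
  · push Not at hl
    simp only [hl, ne_eq, not_true_eq_false, if_false]
    rw [altGo_eq_pairGo array (array.length - 1)]
    have := fold_eq_pairGo array hl (array.length - 1)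
    have hcast : ((array.length - 1 : Nat) : Int) + 1 = (array.length : Int) := by omega
    rw [hcast] at this
    rw [this]
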